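-- pv_equiv track=rewrite | github.com/Project-Ellie/DeepGomoku | cmclient/api/basics.py | string_to_stones
-- ===== SOURCE A (Python) =====
-- def string_to_stones(encoded):
--     """
--     returns an array of pairs for a string-encoded sequence
--     e.g. [('A',1), ('M',14)] for 'a1m14'
--     """
--     if encoded == '':
--         return [None]
--     x, y = encoded[0].upper(), 0
--     stones = []
--     for c in encoded[1:]:
--         if c.isdigit():
--             y = 10 * y + int(c)
--         else:
--             stones.append((x, y))
--             x = c.upper()
--             y = 0
--     stones.append((x, y))
--     return stones
-- ===== SOURCE B (Python) =====
-- def _digits(s, i):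
--     # consume the digit run of s starting at i, returning its decimal value and
--     # the index just past it
--     val = 0
--     while i < len(s) and s[i].isdigit():
--         val = 10 * val + (ord(s[i]) - 48)
--         i += 1
--     return val, i
--
--
-- def string_to_stones(encoded):
--     """
--     returns an array of pairs for a string-encoded sequence
--     e.g. [('A',1), ('M',14)] for 'a1m14'
--     """
--     if not encoded:
--         return [None]
--     out = []
--     i = 0
--     while i < len(encoded):
--         letter = encoded[i].upper()
--         val, i = _digits(encoded, i + 1)
--         out.append((letter, val))
--     return out
-- ===== Notes on version B (the rewrite author's own statement) =====
-- stated objective: alternative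
-- what changed: Replaced A's per-character state machine (mutable current-letter/value with a branch per char) by a token-at-a-time tokenizer: a helper consumes a whole digit run at once (returning its value and the rest) and the outer loop emits one (letter, value) pair per iteration.
import Mathlib
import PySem

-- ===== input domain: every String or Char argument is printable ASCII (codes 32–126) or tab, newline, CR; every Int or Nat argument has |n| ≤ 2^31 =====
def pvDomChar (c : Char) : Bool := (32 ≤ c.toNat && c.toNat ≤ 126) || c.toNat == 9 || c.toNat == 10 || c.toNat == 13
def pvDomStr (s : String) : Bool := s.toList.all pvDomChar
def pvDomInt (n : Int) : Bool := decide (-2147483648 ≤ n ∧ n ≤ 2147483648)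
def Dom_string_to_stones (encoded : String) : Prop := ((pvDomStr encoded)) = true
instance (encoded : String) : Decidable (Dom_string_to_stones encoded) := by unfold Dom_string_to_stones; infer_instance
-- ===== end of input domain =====

-- B replaces A's per-character state machine by a run-at-a-time tokenizer (objective: alternative).

-- ===== PORT A =====
-- A's for-loop over encoded[1:] with mutable state (x, y, stones); `int(c)` is ported as
-- (PySem.Int.ofChars? [c]).getD 0 — exact, since that branch only runs when c.isdigit(),
-- where int(c) never raises.
def stoneLoopA : String → Int → List Char → List (Option (String × Int)) → List (Option (String × Int))
  | x, y, [], stones => stones ++ [some (x, y)]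
  | x, y, c :: cs, stones =>
    if PySem.Chars.isdigit c then
      stoneLoopA x (10 * y + (PySem.Int.ofChars? [c]).getD 0) cs stones
    else
      stoneLoopA (PySem.Str.upper (String.ofList [c])) 0 cs (stones ++ [some (x, y)])

def string_to_stones (encoded : String) : List (Option (String × Int)) :=
  match encoded.toList with
  | [] => [none]
  | c0 :: rest => stoneLoopA (PySem.Str.upper (String.ofList [c0])) 0 rest []

-- ===== PORT B =====
-- _digits(s, i): consume the digit run of s starting at i (value via ord(c) - 48),
-- returning its value and the index just past it
def digitsB (s : List Char) (val : Int) (i : Nat) : Int × Nat :=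
  if h : i < s.length ∧ PySem.Chars.isdigit s[i]! then
    digitsB s (10 * val + ((s[i]!.toNat : Int) - 48)) (i + 1)
  else
    (val, i)
  termination_by s.length - i
  decreasing_by omega

-- needed only so that tokensB's recursion is seen to terminate
theorem digitsB_le (s : List Char) : ∀ (i : Nat) (val : Int), i ≤ (digitsB s val i).2
  | i, val => by
    unfold digitsB
    split
    · exact le_trans (Nat.le_succ i) (digitsB_le s (i + 1) _)
    · exact le_refl i
  termination_by i => s.length - i
  decreasing_by
    rename_i h
    omega

-- the outer while loop of B: one (letter, value) token per iteration
def tokensB (s : List Char) (i : Nat) : List (Option (String × Int)) :=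
  if h : i < s.length then
    some (PySem.Str.upper (String.ofList [s[i]!]), (digitsB s 0 (i + 1)).1) ::
      tokensB s (digitsB s 0 (i + 1)).2
  else
    []
  termination_by s.length - i
  decreasing_by
    have := digitsB_le s (i + 1) 0
    omega

def string_to_stones_alt (encoded : String) : List (Option (String × Int)) :=
  match encoded.toList with
  | [] => [none]
  | c0 :: rest => tokensB (c0 :: rest) 0

-- ===== PRECONDITION & SPEC =====
def Spec_string_to_stones (encoded : String) (out : List (Option (String × Int))) : Prop := out = string_to_stones_alt encoded
instance (encoded : String) (out : List (Option (String × Int))) : Decidable (Spec_string_to_stones encoded out) := by unfold Spec_string_to_stones; infer_instance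

-- ===== CLAIM (what is proved, stated in full; the proofs are below) =====
def Claim_equal_string_to_stones : Prop := ∀ (encoded : String), Dom_string_to_stones encoded → Spec_string_to_stones encoded (string_to_stones encoded)

-- ===== LEMMAS AND PROOFS =====

-- ghost list-level versions of B's two loops, used only to organise the proof
def digitsL : Int → List Char → Int × List Char
  | val, [] => (val, [])
  | val, c :: cs =>
    if PySem.Chars.isdigit c then digitsL (10 * val + ((c.toNat : Int) - 48)) cs
    else (val, c :: cs)

theorem digitsL_suffix : ∀ (v : Int) (cs : List Char), (digitsL v cs).2 <:+ cs
  | _, [] => List.suffix_refl _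
  | v, c :: cs => by
    unfold digitsL
    split
    · exact (digitsL_suffix _ cs).trans (List.suffix_cons c cs)
    · exact List.suffix_refl _

def tokensL : List Char → List (Option (String × Int))
  | [] => []
  | c :: cs =>
    some (PySem.Str.upper (String.ofList [c]), (digitsL 0 cs).1) :: tokensL (digitsL 0 cs).2
  termination_by cs => cs.length
  decreasing_by
    exact Nat.lt_succ_of_le (digitsL_suffix 0 cs).length_le

theorem tokensL_cons (c : Char) (cs : List Char) :
    tokensL (c :: cs) =
      some (PySem.Str.upper (String.ofList [c]), (digitsL 0 cs).1) :: tokensL (digitsL 0 cs).2 := by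
  rw [tokensL.eq_def]

-- a suffix of s sits at distance (s.length - its length) from the left
theorem suffix_eq_drop {t s : List Char} (h : t <:+ s) : t = s.drop (s.length - t.length) := by
  obtain ⟨p, rfl⟩ := h
  simp

-- B's index-based digit loop is the ghost list-level one on the drop
theorem digitsB_eq_digitsL (s : List Char) : ∀ (i : Nat) (v : Int), i ≤ s.length →
    digitsB s v i = ((digitsL v (s.drop i)).1, s.length - (digitsL v (s.drop i)).2.length)
  | i, v => fun hi => by
    unfold digitsB
    split
    · rename_i h
      have hlt : i < s.length := h.1
      have hdrop : s.drop i = s[i] :: s.drop (i + 1) := List.drop_eq_getElem_cons hlt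
      have hbang : s[i]! = s[i] := getElem!_pos s i hlt
      rw [digitsB_eq_digitsL s (i + 1) _ hlt, hdrop, digitsL, if_pos (hbang ▸ h.2), hbang]
    · rename_i h
      rcases Nat.lt_or_ge i s.length with hlt | hge
      · have hdrop : s.drop i = s[i] :: s.drop (i + 1) := List.drop_eq_getElem_cons hlt
        have hbang : s[i]! = s[i] := getElem!_pos s i hlt
        have hnd : ¬ PySem.Chars.isdigit s[i] = true := by
          intro hd; exact h ⟨hlt, hbang ▸ hd⟩
        rw [hdrop, digitsL, if_neg hnd]
        simp only
        congr 1
        have : (s[i] :: s.drop (i + 1)).length = s.length - i := by rw [← hdrop]; simp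
        omega
      · have : s.drop i = [] := List.drop_eq_nil_of_le hge
        rw [this, digitsL]
        simp
        omega
  termination_by i => s.length - i
  decreasing_by
    rename_i h
    have : i < s.length := h.1
    omega

-- B's index-based token loop is the ghost list-level one on the drop
theorem tokensB_eq_tokensL_aux (s : List Char) (n : Nat) : ∀ (i : Nat), i ≤ s.length →
    s.length - i ≤ n → tokensB s i = tokensL (s.drop i) := by
  induction n with
  | zero =>
    intro i hi hn
    have hie : i = s.length := by omega
    rw [tokensB, dif_neg (by omega), List.drop_eq_nil_of_le (by omega), tokensL]
  | succ n ih =>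
    intro i hi hn
    by_cases hlt : i < s.length
    · have hdrop : s.drop i = s[i] :: s.drop (i + 1) := List.drop_eq_getElem_cons hlt
      have hbang : s[i]! = s[i] := getElem!_pos s i hlt
      have hsuf := digitsL_suffix 0 (s.drop (i + 1))
      have hlen : (digitsL 0 (s.drop (i + 1))).2.length ≤ s.length - (i + 1) := by
        have := hsuf.length_le
        simp only [List.length_drop] at this
        omega
      have hdig := digitsB_eq_digitsL s (i + 1) 0 hlt
      rw [tokensB, dif_pos hlt, hdrop, tokensL_cons, hbang, hdig]
      have hj : (digitsL 0 (s.drop (i + 1))).2 =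
          s.drop (s.length - (digitsL 0 (s.drop (i + 1))).2.length) := by
        have : (digitsL 0 (s.drop (i + 1))).2 <:+ s :=
          hsuf.trans (List.drop_suffix (i + 1) s)
        exact suffix_eq_drop this
      rw [ih (s.length - (digitsL 0 (s.drop (i + 1))).2.length) (by omega) (by omega), ← hj]
    · rw [tokensB, dif_neg hlt, List.drop_eq_nil_of_le (by omega), tokensL]

theorem tokensB_eq_tokensL (s : List Char) (i : Nat) (hi : i ≤ s.length) :
    tokensB s i = tokensL (s.drop i) :=
  tokensB_eq_tokensL_aux s (s.length - i) i hi (le_refl _)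

theorem char_eq_of_toNat {c d : Char} (h : c.val.toNat = d.val.toNat) : c = d :=
  Char.ext (UInt32.toNat_inj.mp h)

-- int(c) for a single ASCII digit character is ord(c) - 48
theorem ofChars_digit (c : Char) (h : PySem.Chars.isdigit c = true) :
    (PySem.Int.ofChars? [c]).getD 0 = (c.toNat : Int) - 48 := by
  have hb : 48 ≤ c.toNat ∧ c.toNat ≤ 57 := by
    simp only [PySem.Chars.isdigit, Bool.and_eq_true, decide_eq_true_eq] at h
    exact ⟨h.1, h.2⟩
  have hval : c.val.toNat = 48 ∨ c.val.toNat = 49 ∨ c.val.toNat = 50 ∨ c.val.toNat = 51 ∨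
      c.val.toNat = 52 ∨ c.val.toNat = 53 ∨ c.val.toNat = 54 ∨ c.val.toNat = 55 ∨
      c.val.toNat = 56 ∨ c.val.toNat = 57 := by
    have h1 := hb.1; have h2 := hb.2
    unfold Char.toNat at h1 h2
    omega
  rcases hval with h | h | h | h | h | h | h | h | h | h <;>
  first
  | (have e : c = '0' := char_eq_of_toNat (by rw [h]; decide); subst e; decide)
  | (have e : c = '1' := char_eq_of_toNat (by rw [h]; decide); subst e; decide)
  | (have e : c = '2' := char_eq_of_toNat (by rw [h]; decide); subst e; decide)
  | (have e : c = '3' := char_eq_of_toNat (by rw [h]; decide); subst e; decide)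
  | (have e : c = '4' := char_eq_of_toNat (by rw [h]; decide); subst e; decide)
  | (have e : c = '5' := char_eq_of_toNat (by rw [h]; decide); subst e; decide)
  | (have e : c = '6' := char_eq_of_toNat (by rw [h]; decide); subst e; decide)
  | (have e : c = '7' := char_eq_of_toNat (by rw [h]; decide); subst e; decide)
  | (have e : c = '8' := char_eq_of_toNat (by rw [h]; decide); subst e; decide)
  | (have e : c = '9' := char_eq_of_toNat (by rw [h]; decide); subst e; decide)

-- the key loop invariant: A's state machine from state (x, y) on cs produces the pending
-- token (x, y extended by the leading digit run) followed by B's tokens of the rest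
theorem stoneLoopA_eq (cs : List Char) : ∀ (x : String) (y : Int) (stones : List (Option (String × Int))),
    stoneLoopA x y cs stones = stones ++ (some (x, (digitsL y cs).1) :: tokensL (digitsL y cs).2) := by
  induction cs with
  | nil => intro x y stones; simp [stoneLoopA, digitsL, tokensL]
  | cons c cs ih =>
    intro x y stones
    unfold stoneLoopA digitsL
    by_cases hd : PySem.Chars.isdigit c = true
    · simp only [if_pos hd]
      rw [ih, ofChars_digit c hd]
    · simp only [if_neg hd]
      rw [ih, tokensL_cons]
      simp

theorem string_to_stones_eq (encoded : String) :
    string_to_stones encoded = string_to_stones_alt encoded := by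
  unfold string_to_stones string_to_stones_alt
  cases h : encoded.toList with
  | nil => rfl
  | cons c0 rest =>
    show stoneLoopA (PySem.Str.upper (String.ofList [c0])) 0 rest [] = tokensB (c0 :: rest) 0
    rw [stoneLoopA_eq, tokensB_eq_tokensL (c0 :: rest) 0 (by simp)]
    simp only [List.drop_zero]
    rw [tokensL_cons]
    simp

-- ===== VERDICT (by name: the statement is the Claim_ definition above) =====
theorem string_to_stones_spec : Claim_equal_string_to_stones := by
  intro encoded _
  unfold Spec_string_to_stones
  exact string_to_stones_eq encoded
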